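-- pv_equiv track=rewrite | github.com/ramjeetsingh/Codeforces | 1593B.py | if_100
-- ===== SOURCE A (Python) =====
-- def if_100(n):
-- 	first_0_present = False
-- 	no = str(n)
-- 	first_0_at = 0
--
-- 	for i in range(len(no)-1, 0, -1):
-- 		if no[i] == '0':
-- 			first_0_present = True
-- 			first_0_at = i
-- 			break
--
-- 	if first_0_present == False:
-- 		return (-1)
-- 	else:
-- 		second_0_present = False
-- 		second_0_at = 0
--
-- 		for i in range(first_0_at-1, 0, -1):
-- 			if no[i] == '0':
-- 				second_0_present = True
-- 				second_0_at = i
-- 				break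
--
-- 		if second_0_present == False:
-- 			return (-1)
-- 		else:
-- 			return (((first_0_at - second_0_at) - 1) + ((len(no) - first_0_at)-1))
-- ===== SOURCE B (Python) =====
-- def if_100(n):
--     no = str(n)
--     zeros = [i for i, c in enumerate(no) if c == '0' and i > 0]
--     if len(zeros) < 2:
--         return -1
--     return len(no) - zeros[-2] - 2
-- ===== Notes on version B (the rewrite author's own statement) =====
-- stated objective: simpler
-- what changed: A runs two backward break-searches (last zero, then the zero before it) and combines the two found positions in a two-term formula; B makes one forward pass collecting the positive zero indices and returns the closed form length minus the second-to-last zero index minus two, since the last-zero position cancels out of A's formula.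
import Mathlib
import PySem

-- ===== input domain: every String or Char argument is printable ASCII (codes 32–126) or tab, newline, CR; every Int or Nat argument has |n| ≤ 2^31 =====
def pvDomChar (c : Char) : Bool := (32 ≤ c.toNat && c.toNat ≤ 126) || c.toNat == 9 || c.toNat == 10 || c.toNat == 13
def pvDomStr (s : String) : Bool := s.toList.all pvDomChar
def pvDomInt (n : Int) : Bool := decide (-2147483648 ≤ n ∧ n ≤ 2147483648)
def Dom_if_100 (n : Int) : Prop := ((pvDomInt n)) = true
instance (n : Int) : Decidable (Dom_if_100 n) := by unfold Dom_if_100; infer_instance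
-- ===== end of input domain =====

-- B replaces A's two backward break-searches combined by a two-term formula with one
-- forward pass collecting the positive zero indices and the closed form len - zeros[-2] - 2 (objective: simpler).

-- ===== PORT A =====
-- the two backward 'for … break' loops become find? over the same countdown range
def if_100 (n : Int) : Int :=
  let no := PySem.Int.toStr n
  match (PySem.List.pyRange (PySem.Str.len no - 1) 0 (-1)).find?
      (fun i => PySem.Str.pyGet? no i == some '0') with
  | none => -1
  | some first0 =>
    match (PySem.List.pyRange (first0 - 1) 0 (-1)).find?
        (fun i => PySem.Str.pyGet? no i == some '0') with
    | none => -1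
    | some second0 => ((first0 - second0) - 1) + ((PySem.Str.len no - first0) - 1)

-- ===== PORT B =====
def if_100_alt (n : Int) : Int :=
  let no := PySem.Int.toStr n
  let zeros := ((PySem.List.enumerate no.toList 0).filter
      (fun p => p.2 == '0' && decide (p.1 > 0))).map Prod.fst
  if zeros.length < 2 then -1
  else
    match PySem.List.pyGet? zeros (-2) with
    | some j => PySem.Str.len no - j - 2
    | none => -1   -- unreachable: zeros.length ≥ 2, so zeros[-2] exists

-- ===== PRECONDITION & SPEC =====
def Spec_if_100 (n : Int) (out : Int) : Prop := out = if_100_alt n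
instance (n : Int) (out : Int) : Decidable (Spec_if_100 n out) := by unfold Spec_if_100; infer_instance

-- ===== CLAIM (what is proved, stated in full; the proofs are below) =====
def Claim_equal_if_100 : Prop := ∀ (n : Int), Dom_if_100 n → Spec_if_100 n (if_100 n)

-- ===== LEMMAS AND PROOFS =====

-- a backward break-search over range(a, 0, -1) finds the last match among indices 1..a
theorem find_countdown (a : Int) (q : Int → Bool) :
    (PySem.List.pyRange a 0 (-1)).find? q = ((PySem.List.pyRange 1 (a + 1) 1).filter q).getLast? := by
  rw [PySem.List.pyRange_neg_one_eq_reverse, List.getLast?_filter]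
  norm_num

-- B's zero-index list equals the filter of the index range 1..len-1
theorem zeros_eq (no : String) :
    ((PySem.List.enumerate no.toList 0).filter
        (fun p => p.2 == '0' && decide (p.1 > 0))).map Prod.fst
      = (PySem.List.pyRange 1 (no.toList.length : Int) 1).filter
          (fun i => PySem.Str.pyGet? no i == some '0') := by
  rw [PySem.List.enumerate_eq_map_pyRange no.toList '0', List.filter_map, List.map_map]
  simp only [Function.comp_def, PySem.List.len_eq, PySem.Str.pyGet?_eq]
  rcases h : no.toList.length with _ | m
  · simp [PySem.List.pyRange_one_eq_nil]
  · rw [PySem.List.pyRange_one_cons (a := 0) (by omega)]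
    rw [List.filter_cons]
    simp only [lt_irrefl, gt_iff_lt, decide_false, Bool.and_false]
    norm_num
    have : ∀ i ∈ PySem.List.pyRange (1 : Int) ((m:Int)+1),
        ((PySem.List.pyGetD no.toList i '0' == '0' && decide (i > 0)) : Bool)
        = (PySem.List.pyGet? no.toList i == some '0') := by
      intro i hi
      rw [PySem.List.mem_pyRange_one] at hi
      obtain ⟨k, rfl⟩ : ∃ k : Nat, i = (k : Int) := ⟨i.toNat, by omega⟩
      have hk : k < no.toList.length := by omega
      rw [PySem.List.pyGet?_natCast, PySem.List.pyGetD_eq_getElem no.toList '0' (by omega) (by omega)]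
      simp [List.getElem?_eq_getElem hk, show 0 < k by omega]
    rw [List.filter_congr this]

-- decompose the filtered index list at its last element (the list is strictly increasing)
theorem last_split (L : Nat) (q : Int → Bool) (i : Int)
    (h : ((PySem.List.pyRange 1 (L : Int) 1).filter q).getLast? = some i) :
    (PySem.List.pyRange 1 (L : Int) 1).filter q
      = ((PySem.List.pyRange 1 i 1).filter q) ++ [i] := by
  have hmem : i ∈ (PySem.List.pyRange 1 (L : Int) 1).filter q := by
    obtain ⟨l', hl'⟩ := List.getLast?_eq_some_iff.mp h
    rw [hl']; simp
  rw [List.mem_filter, PySem.List.mem_pyRange_one] at hmem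
  obtain ⟨⟨h1, h2⟩, hq⟩ := hmem
  have hsplit := PySem.List.pyRange_one_append 1 i (L : Int) h1 (le_of_lt h2)
  rw [hsplit, List.filter_append] at h ⊢
  rw [PySem.List.pyRange_one_cons h2, List.filter_cons, if_pos (by simp [hq])] at h ⊢
  suffices hnil : (PySem.List.pyRange (i+1) (L : Int) 1).filter q = [] by rw [hnil]
  rcases hrest : (PySem.List.pyRange (i+1) (L : Int) 1).filter q with _ | ⟨y, ys⟩
  · rfl
  · exfalso
    rw [hrest] at h
    rw [List.getLast?_append_cons,
      show (i :: y :: ys).getLast? = (y :: ys).getLast? from List.getLast?_cons_cons ..] at h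
    have hmem2 : i ∈ y :: ys := by
      obtain ⟨l', hl'⟩ := List.getLast?_eq_some_iff.mp h
      rw [hl']; simp
    rw [← hrest, List.mem_filter, PySem.List.mem_pyRange_one] at hmem2
    omega

-- both ports agree as functions of the digit string
theorem core (no : String) :
    (match (PySem.List.pyRange (PySem.Str.len no - 1) 0 (-1)).find?
        (fun i => PySem.Str.pyGet? no i == some '0') with
    | none => -1
    | some first0 =>
      match (PySem.List.pyRange (first0 - 1) 0 (-1)).find?
          (fun i => PySem.Str.pyGet? no i == some '0') with
      | none => -1
      | some second0 => ((first0 - second0) - 1) + ((PySem.Str.len no - first0) - 1))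
    = (let zeros := ((PySem.List.enumerate no.toList 0).filter
          (fun p => p.2 == '0' && decide (p.1 > 0))).map Prod.fst
      if zeros.length < 2 then (-1 : Int)
      else
        match PySem.List.pyGet? zeros (-2) with
        | some j => PySem.Str.len no - j - 2
        | none => -1) := by
  have hlen : PySem.Str.len no = (no.toList.length : Int) := PySem.Str.len_eq no
  have hfind1 : (PySem.List.pyRange (PySem.Str.len no - 1) 0 (-1)).find?
      (fun i => PySem.Str.pyGet? no i == some '0')
      = ((PySem.List.pyRange 1 (no.toList.length : Int) 1).filter
          (fun i => PySem.Str.pyGet? no i == some '0')).getLast? := by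
    rw [find_countdown, hlen, show (no.toList.length : Int) - 1 + 1 = (no.toList.length : Int) by omega]
  simp only [zeros_eq, hfind1]
  rcases hZ : ((PySem.List.pyRange 1 (no.toList.length : Int) 1).filter
      (fun i => PySem.Str.pyGet? no i == some '0')).getLast? with _ | i
  · rw [List.getLast?_eq_none_iff.mp hZ]; simp
  · have hsplit := last_split no.toList.length _ i hZ
    have hfind2 : (PySem.List.pyRange (i - 1) 0 (-1)).find?
        (fun i => PySem.Str.pyGet? no i == some '0')
        = ((PySem.List.pyRange 1 i 1).filter
            (fun i => PySem.Str.pyGet? no i == some '0')).getLast? := by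
      rw [find_countdown, show i - 1 + 1 = i by omega]
    simp only [hfind2]
    rcases hF : ((PySem.List.pyRange 1 i 1).filter
        (fun i => PySem.Str.pyGet? no i == some '0')).getLast? with _ | j
    · rw [List.getLast?_eq_none_iff.mp hF] at hsplit
      rw [hsplit]; simp
    · have hF1ne : (PySem.List.pyRange 1 i 1).filter
          (fun i => PySem.Str.pyGet? no i == some '0') ≠ [] := by
        intro h; rw [h] at hF; simp at hF
      have hF1len : 1 ≤ ((PySem.List.pyRange 1 i 1).filter
          (fun i => PySem.Str.pyGet? no i == some '0')).length := List.length_pos_iff.mpr hF1ne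
      rw [hsplit]
      rw [if_neg (by simp only [List.length_append, List.length_cons, List.length_nil]; omega)]
      have hget : PySem.List.pyGet? ((PySem.List.pyRange 1 i 1).filter
          (fun i => PySem.Str.pyGet? no i == some '0') ++ [i]) (-2) = some j := by
        rw [PySem.List.pyGet?_neg_ofNat _ 2 (by omega)
          (by simp only [List.length_append, List.length_cons, List.length_nil]; omega)]
        rw [List.getElem?_append_left
          (by simp only [List.length_append, List.length_cons, List.length_nil]; omega)]
        simp only [List.length_append, List.length_cons, List.length_nil]
        rw [show ((PySem.List.pyRange 1 i 1).filter
          (fun i => PySem.Str.pyGet? no i == some '0')).length + (0+1) - 2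
          = ((PySem.List.pyRange 1 i 1).filter
          (fun i => PySem.Str.pyGet? no i == some '0')).length - 1 by omega]
        rw [← List.getLast?_eq_getElem?, hF]
      rw [hget]
      ring

-- ===== VERDICT (by name: the statement is the Claim_ definition above) =====
theorem if_100_spec : Claim_equal_if_100 := by
  intro n _
  unfold Spec_if_100 if_100 if_100_alt
  exact core (PySem.Int.toStr n)
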